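-- pv_equiv track=rewrite | github.com/Dragonzhi/PythonW | ACM选拔/7-6.py | can_place_item_prefix_sum
-- ===== SOURCE A (Python) =====
-- def can_place_item_prefix_sum(m, n, a, b, backpack):
--     # 构建前缀和数组
--     prefix = [[0] * (n + 1) for _ in range(m + 1)]
--     for i in range(1, m + 1):
--         for j in range(1, n + 1):
--             prefix[i][j] = prefix[i - 1][j] + prefix[i][j - 1] - prefix[i - 1][j - 1] + (1 if backpack[i - 1][j - 1] == '1' else 0)
--
--     # 检查每个可能的区域
--     for i in range(m - a + 1):
--         for j in range(n - b + 1):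
--             # 计算区域中已放入物品的数量
--             total = prefix[i + a][j + b] - prefix[i][j + b] - prefix[i + a][j] + prefix[i][j]
--             if total == 0:
--                 return 1
--     return 0
-- ===== SOURCE B (Python) =====
-- def can_place_item_prefix_sum(m, n, a, b, backpack):
--     # Direct window scan: no prefix-sum table; a window qualifies iff it contains no '1'.
--     def window_empty(i, j):
--         return all(backpack[i + x][j + y] != '1' for x in range(a) for y in range(b))
--     return 1 if any(window_empty(i, j) for i in range(m - a + 1) for j in range(n - b + 1)) else 0
-- ===== Notes on version B (the rewrite author's own statement) =====
-- stated objective: simpler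
-- what changed: B drops A's (m+1)x(n+1) 2D prefix-sum table entirely and instead tests each candidate a x b window by scanning its cells directly for a '1'.
-- outside the precondition, e.g. on can_place_item_prefix_sum(1, 1, 1, -1, ['0']): A returns 1, B returns 1
import Mathlib
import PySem

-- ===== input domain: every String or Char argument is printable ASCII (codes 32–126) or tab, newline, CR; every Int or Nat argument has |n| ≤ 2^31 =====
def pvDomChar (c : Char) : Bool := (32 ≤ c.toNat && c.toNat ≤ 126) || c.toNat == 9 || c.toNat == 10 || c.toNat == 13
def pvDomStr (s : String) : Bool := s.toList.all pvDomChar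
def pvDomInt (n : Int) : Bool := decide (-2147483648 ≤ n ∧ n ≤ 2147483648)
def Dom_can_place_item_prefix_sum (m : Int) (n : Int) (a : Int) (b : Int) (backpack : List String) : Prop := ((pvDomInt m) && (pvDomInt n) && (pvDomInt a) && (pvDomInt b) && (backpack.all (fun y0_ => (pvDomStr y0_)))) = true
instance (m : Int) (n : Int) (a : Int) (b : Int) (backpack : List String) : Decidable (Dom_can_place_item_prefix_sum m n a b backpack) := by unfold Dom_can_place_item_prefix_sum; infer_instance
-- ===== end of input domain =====

-- B replaces A's 2D prefix-sum table with a direct scan of each candidate window (no table at all); objective: simpler.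

-- ===== PORT A =====
-- shared indexing helper: backpack[i][j] as an Option Char (none exactly where Python raises IndexError;
-- inside Pre_ every index both ports use is in range, so the pyGetD default "" is never taken)
def pvCell (backpack : List String) (i j : Int) : Option Char :=
  PySem.Str.pyGet? (PySem.List.pyGetD backpack i "") j

-- prefix[i][j] read; inside Pre_ all indices used are in range, so the defaults are never taken
def pvGet2 (px : List (List Int)) (i j : Int) : Int :=
  PySem.List.pyGetD (PySem.List.pyGetD px i []) j 0

-- prefix[i][j] = v; in the building loop i, j are always in range, so pySetD is exact
def pvSet2 (px : List (List Int)) (i j : Int) (v : Int) : List (List Int) :=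
  PySem.List.pySetD px i (PySem.List.pySetD (PySem.List.pyGetD px i []) j v)

-- the prefix-sum table built by A's first double loop
def pvBuild (m n : Int) (backpack : List String) : List (List Int) :=
  (PySem.List.pyRange 1 (m+1) 1).foldl (fun px i =>
    (PySem.List.pyRange 1 (n+1) 1).foldl (fun px j =>
      pvSet2 px i j
        (pvGet2 px (i-1) j + pvGet2 px i (j-1) - pvGet2 px (i-1) (j-1) +
          (if pvCell backpack (i-1) (j-1) = some '1' then 1 else 0))) px)
    ((PySem.List.pyRange 0 (m+1) 1).map (fun _ => List.replicate (n+1).toNat (0:Int)))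

def can_place_item_prefix_sum (m : Int) (n : Int) (a : Int) (b : Int) (backpack : List String) : Int :=
  let px := pvBuild m n backpack
  -- the double search loop with early `return 1`, as an Option accumulator
  let res : Option Int :=
    (PySem.List.pyRange 0 (m-a+1) 1).foldl (fun acc i =>
      (PySem.List.pyRange 0 (n-b+1) 1).foldl (fun acc j =>
        match acc with
        | some r => some r
        | none =>
          if pvGet2 px (i+a) (j+b) - pvGet2 px i (j+b) - pvGet2 px (i+a) j + pvGet2 px i j = 0
          then some 1 else none) acc) none
  match res with
  | some r => r
  | none => 0

-- ===== PORT B =====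
def pvWindowEmpty (backpack : List String) (a b i j : Int) : Bool :=
  (PySem.List.pyRange 0 a 1).all (fun x =>
    (PySem.List.pyRange 0 b 1).all (fun y => !(pvCell backpack (i+x) (j+y) == some '1')))

def can_place_item_prefix_sum_alt (m : Int) (n : Int) (a : Int) (b : Int) (backpack : List String) : Int :=
  if (PySem.List.pyRange 0 (m-a+1) 1).any (fun i =>
       (PySem.List.pyRange 0 (n-b+1) 1).any (fun j => pvWindowEmpty backpack a b i j))
  then 1 else 0

-- ===== PRECONDITION & SPEC =====
-- Pre_ = the inputs on which Python A returns normally, minus one carve-out: it requires a buildable grid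
-- (m <= 0, n <= 0, or at least m rows of length at least n -- otherwise A raises IndexError) and then either the
-- natural domain (all of m, n, a, b non-negative) or an empty search range (a > m or b > n, where A returns 0
-- without reading anything).  Excluded while A may still return: negative a or b with a <= m and b <= n, where
-- A's result arises from negative-index wraparound into the prefix table -- outside the problem's natural domain.
def Pre_can_place_item_prefix_sum (m : Int) (n : Int) (a : Int) (b : Int) (backpack : List String) : Prop :=
  (m ≤ 0 ∨ n ≤ 0 ∨ (m ≤ backpack.length ∧ ∀ s ∈ backpack.take m.toNat, n ≤ (s.toList.length : Int)))
  ∧ ((0 ≤ m ∧ 0 ≤ n ∧ 0 ≤ a ∧ 0 ≤ b) ∨ m < a ∨ n < b)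
instance (m : Int) (n : Int) (a : Int) (b : Int) (backpack : List String) : Decidable (Pre_can_place_item_prefix_sum m n a b backpack) := by unfold Pre_can_place_item_prefix_sum; infer_instance

def pvWitness_can_place_item_prefix_sum : Int × Int × Int × Int × List String :=
  (2, 2, 1, 1, ["10", "01"])

def Spec_can_place_item_prefix_sum (m : Int) (n : Int) (a : Int) (b : Int) (backpack : List String) (out : Int) : Prop := out = can_place_item_prefix_sum_alt m n a b backpack
instance (m : Int) (n : Int) (a : Int) (b : Int) (backpack : List String) (out : Int) : Decidable (Spec_can_place_item_prefix_sum m n a b backpack out) := by unfold Spec_can_place_item_prefix_sum; infer_instance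

-- ===== CLAIM (what is proved, stated in full; the proofs are below) =====
def Claim_equal_can_place_item_prefix_sum : Prop := ∀ (m : Int) (n : Int) (a : Int) (b : Int) (backpack : List String), Dom_can_place_item_prefix_sum m n a b backpack → Pre_can_place_item_prefix_sum m n a b backpack → Spec_can_place_item_prefix_sum m n a b backpack (can_place_item_prefix_sum m n a b backpack)

-- ===== LEMMAS AND PROOFS =====

-- 0/1 indicator of an occupied cell, Nat-indexed
def pvV (backpack : List String) (x y : Nat) : Int :=
  if pvCell backpack (x : Int) (y : Int) = some '1' then 1 else 0

-- number of occupied cells in the rectangle [0,i) × [0,j)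
def pvS (backpack : List String) (i j : Nat) : Int :=
  ∑ x ∈ Finset.range i, ∑ y ∈ Finset.range j, pvV backpack x y

-- the table contents after rows 1..i-1 are complete and row i is written up to column j
def pvStage (backpack : List String) (i j x y : Nat) : Int :=
  if x < i ∨ y = 0 ∨ (x = i ∧ y ≤ j) then pvS backpack x y else 0

def pvTab (backpack : List String) (M N i j : Nat) (px : List (List Int)) : Prop :=
  px.length = M + 1 ∧ (∀ k (hk : k < px.length), px[k].length = N + 1) ∧
  (∀ x y : Nat, x ≤ M → y ≤ N → pvGet2 px (x : Int) (y : Int) = pvStage backpack i j x y)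

-- one cell assignment of the building loop, Nat-indexed (column argument k writes column k+1 of row i)
def pvColB (backpack : List String) (i : Nat) (px : List (List Int)) (k : Nat) : List (List Int) :=
  pvSet2 px (i : Int) ((k+1 : Nat) : Int)
    (pvGet2 px ((i:Int)-1) ((k+1 : Nat) : Int) + pvGet2 px (i:Int) (((k+1 : Nat) : Int)-1)
      - pvGet2 px ((i:Int)-1) (((k+1 : Nat) : Int)-1) +
      (if pvCell backpack ((i:Int)-1) (((k+1 : Nat) : Int)-1) = some '1' then 1 else 0))

-- one whole row of the building loop (row argument r writes row r+1)
def pvRowB (backpack : List String) (N : Nat) (px : List (List Int)) (r : Nat) : List (List Int) :=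
  (List.range' 0 N).foldl (pvColB backpack (r+1)) px

theorem pvV_nonneg (backpack : List String) (x y : Nat) : 0 ≤ pvV backpack x y := by
  unfold pvV; split <;> norm_num

theorem pvS_zero_right (backpack : List String) (i : Nat) : pvS backpack i 0 = 0 := by
  simp [pvS]

theorem pvS_zero_left (backpack : List String) (j : Nat) : pvS backpack 0 j = 0 := by
  simp [pvS]

theorem pvS_succ_succ (backpack : List String) (i j : Nat) :
    pvS backpack (i+1) (j+1) =
      pvS backpack i (j+1) + pvS backpack (i+1) j - pvS backpack i j + pvV backpack i j := by
  simp only [pvS, Finset.sum_range_succ]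
  ring

theorem pvTotal (backpack : List String) (I J A B : Nat) :
    pvS backpack (I+A) (J+B) - pvS backpack I (J+B) - pvS backpack (I+A) J + pvS backpack I J
      = ∑ x ∈ Finset.Ico I (I+A), ∑ y ∈ Finset.Ico J (J+B), pvV backpack x y := by
  have inner : ∀ x, ∑ y ∈ Finset.Ico J (J+B), pvV backpack x y
      = (∑ y ∈ Finset.range (J+B), pvV backpack x y) - ∑ y ∈ Finset.range J, pvV backpack x y :=
    fun x => Finset.sum_Ico_eq_sub _ (Nat.le_add_right J B)
  rw [Finset.sum_congr rfl (fun x _ => inner x), Finset.sum_sub_distrib,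
    Finset.sum_Ico_eq_sub _ (Nat.le_add_right I A), Finset.sum_Ico_eq_sub _ (Nat.le_add_right I A)]
  unfold pvS
  ring

theorem pvTotal_zero_iff (backpack : List String) (I J A B : Nat) :
    (pvS backpack (I+A) (J+B) - pvS backpack I (J+B) - pvS backpack (I+A) J + pvS backpack I J = 0)
      ↔ ∀ x < A, ∀ y < B, pvV backpack (I+x) (J+y) = 0 := by
  rw [pvTotal]
  rw [Finset.sum_eq_zero_iff_of_nonneg
    (fun x _ => Finset.sum_nonneg (fun y _ => pvV_nonneg backpack x y))]
  constructor
  · intro h x hx y hy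
    have hx' : I + x ∈ Finset.Ico I (I+A) := by simp [Finset.mem_Ico]; omega
    have h2 := (Finset.sum_eq_zero_iff_of_nonneg
      (fun y _ => pvV_nonneg backpack (I+x) y)).mp (h _ hx')
    exact h2 (J+y) (by simp [Finset.mem_Ico]; omega)
  · intro h x hx
    apply Finset.sum_eq_zero
    intro y hy
    rw [Finset.mem_Ico] at hx hy
    have h3 := h (x - I) (by omega) (y - J) (by omega)
    have hx' : I + (x - I) = x := by omega
    have hy' : J + (y - J) = y := by omega
    rwa [hx', hy'] at h3

theorem pvGet2_eq_getElem (px : List (List Int)) (x y : Nat) (hx : x < px.length)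
    (hy : y < px[x].length) : pvGet2 px (x : Int) (y : Int) = px[x][y] := by
  simp [pvGet2, List.getD_eq_getElem?_getD, hx, hy]

theorem pvSet2_natCast (px : List (List Int)) (x y : Nat) (v : Int) :
    pvSet2 px (x : Int) (y : Int) v = px.set x ((px.getD x []).set y v) := by
  simp [pvSet2]

-- one assignment of the building loop preserves the table invariant
theorem pvTab_step (backpack : List String) (M N i j : Nat)
    (hi1 : 1 ≤ i) (hiM : i ≤ M) (hj1 : 1 ≤ j) (hjN : j ≤ N)
    (px : List (List Int)) (h : pvTab backpack M N i (j-1) px) :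
    pvTab backpack M N i j (pvColB backpack i px (j-1)) := by
  obtain ⟨hlen, hrows, hval⟩ := h
  have hj' : j - 1 + 1 = j := by omega
  have ci : ((i:Int) - 1) = ((i-1 : Nat) : Int) := by omega
  have cj : ((j:Int) - 1) = ((j-1 : Nat) : Int) := by omega
  unfold pvColB
  rw [hj', ci, cj]
  -- the value written is pvS i j
  have hw : pvGet2 px ((i-1 : Nat) : Int) ((j : Nat) : Int)
      + pvGet2 px (i : Int) ((j-1 : Nat) : Int)
      - pvGet2 px ((i-1 : Nat) : Int) ((j-1 : Nat) : Int) +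
      (if pvCell backpack ((i-1 : Nat) : Int) ((j-1 : Nat) : Int) = some '1' then 1 else 0)
      = pvS backpack i j := by
    rw [hval (i-1) j (by omega) hjN, hval i (j-1) hiM (by omega),
      hval (i-1) (j-1) (by omega) (by omega)]
    have e1 : pvStage backpack i (j-1) (i-1) j = pvS backpack (i-1) j := by
      unfold pvStage; rw [if_pos (by omega)]
    have e2 : pvStage backpack i (j-1) i (j-1) = pvS backpack i (j-1) := by
      unfold pvStage
      rcases Nat.eq_zero_or_pos (j-1) with h0 | h0
      · rw [if_pos (by omega), h0, pvS_zero_right]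
      · rw [if_pos (by omega)]
    have e3 : pvStage backpack i (j-1) (i-1) (j-1) = pvS backpack (i-1) (j-1) := by
      unfold pvStage
      rcases Nat.eq_zero_or_pos (j-1) with h0 | h0
      · rw [if_pos (by omega), h0, pvS_zero_right]
      · rw [if_pos (by omega)]
    rw [e1, e2, e3]
    have hrec := pvS_succ_succ backpack (i-1) (j-1)
    have hi' : i - 1 + 1 = i := by omega
    rw [hi', hj'] at hrec
    rw [hrec]
    unfold pvV
    ring
  rw [hw, pvSet2_natCast]
  have hxlt : i < px.length := by omega
  refine ⟨by simpa using hlen, ?_, ?_⟩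
  · intro k hk
    rw [List.length_set] at hk
    rw [List.getElem_set]
    split
    · rw [List.getD_eq_getElem _ _ hxlt, List.length_set]
      exact hrows i hxlt
    · exact hrows k hk
  · intro x y hx hy
    have hrowi : px[i].length = N + 1 := hrows i hxlt
    have hx' : x < (px.set i ((px.getD i []).set j (pvS backpack i j))).length := by
      rw [List.length_set]; omega
    have hlenx : (px.set i ((px.getD i []).set j (pvS backpack i j)))[x].length = N + 1 := by
      rw [List.getElem_set hx']
      split
      · rw [List.getD_eq_getElem _ _ hxlt, List.length_set]; omega
      · exact hrows x (by omega)
    have hy' : y < (px.set i ((px.getD i []).set j (pvS backpack i j)))[x].length := by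
      rw [hlenx]; omega
    rw [pvGet2_eq_getElem _ x y hx' hy']
    by_cases hxi : x = i
    · subst hxi
      have r1 : (px.set x ((px.getD x []).set j (pvS backpack x j)))[x] =
          (px.getD x []).set j (pvS backpack x j) := List.getElem_set_self hx'
      simp only [r1]
      simp only [List.getD_eq_getElem _ _ hxlt]
      have hylen : y < (px[x].set j (pvS backpack x j)).length := by
        rw [List.length_set]; omega
      by_cases hyj : y = j
      · subst hyj
        rw [List.getElem_set_self hylen]
        unfold pvStage; rw [if_pos (by omega)]
      · rw [List.getElem_set_ne (show j ≠ y by omega) hylen]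
        have hv := hval x y hiM hy
        rw [pvGet2_eq_getElem px x y hxlt (by omega)] at hv
        rw [hv]
        unfold pvStage
        by_cases hc : x < x ∨ y = 0 ∨ (x = x ∧ y ≤ j - 1)
        · rw [if_pos hc, if_pos (by omega)]
        · rw [if_neg hc, if_neg (by omega)]
    · simp only [List.getElem_set_ne (show i ≠ x by omega)]
      have hv := hval x y hx hy
      rw [pvGet2_eq_getElem px x y (by omega) (by have := hrows x (by omega); omega)] at hv
      rw [hv]
      unfold pvStage
      by_cases hc : x < i ∨ y = 0 ∨ (x = i ∧ y ≤ j - 1)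
      · rw [if_pos hc, if_pos (by omega)]
      · rw [if_neg hc, if_neg (by omega)]

-- the invariant carries over from the end of one row to the start of the next
theorem pvTab_row_shift (backpack : List String) (M N i : Nat) (px : List (List Int))
    (h : pvTab backpack M N i N px) : pvTab backpack M N (i+1) 0 px := by
  obtain ⟨h1, h2, h3⟩ := h
  refine ⟨h1, h2, ?_⟩
  intro x y hx hy
  rw [h3 x y hx hy]
  unfold pvStage
  by_cases hc : x < i ∨ y = 0 ∨ (x = i ∧ y ≤ N)
  · rw [if_pos hc, if_pos (by omega)]
  · rw [if_neg hc, if_neg (by omega)]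

-- folding one whole row of the building loop
theorem pvRow_fold (backpack : List String) (M N i : Nat) (hi1 : 1 ≤ i) (hiM : i ≤ M) :
    ∀ (t j0 : Nat), j0 + t = N → ∀ px, pvTab backpack M N i j0 px →
    pvTab backpack M N i N ((List.range' j0 t).foldl (pvColB backpack i) px) := by
  intro t
  induction t with
  | zero =>
    intro j0 h0 px hpx
    have hj : j0 = N := by omega
    subst hj
    simpa using hpx
  | succ t ih =>
    intro j0 h0 px hpx
    rw [List.range'_succ, List.foldl_cons]
    have hstep := pvTab_step backpack M N i (j0+1) hi1 hiM (by omega) (by omega) px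
      (by simpa using hpx)
    have : (j0 + 1) - 1 = j0 := by omega
    rw [this] at hstep
    exact ih (j0+1) (by omega) _ hstep

-- folding the rows of the building loop
theorem pvRows_fold (backpack : List String) (M N : Nat) :
    ∀ (t i0 : Nat), i0 + t = M → ∀ px, pvTab backpack M N (i0+1) 0 px →
    pvTab backpack M N (M+1) 0 ((List.range' i0 t).foldl (pvRowB backpack N) px) := by
  intro t
  induction t with
  | zero =>
    intro i0 h0 px hpx
    have hi : i0 = M := by omega
    subst hi
    simpa using hpx
  | succ t ih =>
    intro i0 h0 px hpx
    rw [List.range'_succ, List.foldl_cons]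
    have hrow := pvRow_fold backpack M N (i0+1) (by omega) (by omega) N 0 (by omega) px hpx
    have hshift := pvTab_row_shift backpack M N (i0+1) _ hrow
    exact ih (i0+1) (by omega) _ (by simpa [pvRowB] using hshift)

theorem pvTab_init (backpack : List String) (M N : Nat) :
    pvTab backpack M N 1 0 (List.replicate (M+1) (List.replicate (N+1) (0:Int))) := by
  refine ⟨by simp, by simp, ?_⟩
  intro x y hx hy
  have hx' : x < (List.replicate (M+1) (List.replicate (N+1) (0:Int))).length := by simp; omega
  rw [pvGet2_eq_getElem _ x y hx' (by simp; omega)]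
  simp only [List.getElem_replicate]
  unfold pvStage
  by_cases hc : x < 1 ∨ y = 0 ∨ (x = 1 ∧ y ≤ 0)
  · rw [if_pos hc]
    rcases hc with h | h | h
    · have : x = 0 := by omega
      simp [this, pvS_zero_left]
    · simp [h, pvS_zero_right]
    · have : y = 0 := by omega
      simp [this, pvS_zero_right]
  · rw [if_neg hc]

-- pvBuild, rewritten as the Nat-indexed fold
theorem pvBuild_eq (backpack : List String) (M N : Nat) :
    pvBuild (M : Int) (N : Int) backpack =
      (List.range' 0 M).foldl (pvRowB backpack N)
        (List.replicate (M+1) (List.replicate (N+1) (0:Int))) := by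
  unfold pvBuild
  have hM : ((M : Int) + 1 - 1).toNat = M := by omega
  have hN : ((N : Int) + 1 - 1).toNat = N := by omega
  have hNt : ((N : Int) + 1).toNat = N + 1 := by omega
  have hinit : (PySem.List.pyRange 0 ((M:Int)+1) 1).map (fun _ => List.replicate ((N:Int)+1).toNat (0:Int))
      = List.replicate (M+1) (List.replicate (N+1) (0:Int)) := by
    rw [List.map_const', PySem.List.length_pyRange_one, hNt]
    norm_num
  rw [hinit, PySem.List.pyRange_one 1 ((M : Int)+1), hM, List.foldl_map,
    List.range_eq_range']
  apply PySem.List.foldl_congr_mem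
  intro px r _
  rw [PySem.List.pyRange_one 1 ((N : Int)+1), hN, List.foldl_map, List.range_eq_range']
  unfold pvRowB
  apply PySem.List.foldl_congr_mem
  intro px' k _
  unfold pvColB
  have c1 : (1 + (r : Int)) = ((r+1 : Nat) : Int) := by omega
  have c2 : (1 + (k : Int)) = ((k+1 : Nat) : Int) := by omega
  rw [c1, c2]

theorem pvBuild_get (backpack : List String) (M N x y : Nat) (hx : x ≤ M) (hy : y ≤ N) :
    pvGet2 (pvBuild (M : Int) (N : Int) backpack) (x : Int) (y : Int) = pvS backpack x y := by
  rw [pvBuild_eq]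
  have h := pvRows_fold backpack M N M 0 (by omega) _ (pvTab_init backpack M N)
  obtain ⟨_, _, hval⟩ := h
  rw [hval x y hx hy]
  unfold pvStage
  rw [if_pos (by omega)]

-- the early-return double loop returns `some 1` exactly when some index satisfies the test
theorem pvFoldFlag (l : List Int) (p : Int → Prop) [DecidablePred p] :
    ∀ acc : Option Int,
      l.foldl (fun a i => match a with
        | some r => some r
        | none => if p i then some (1:Int) else none) acc
      = match acc with
        | some r => some r
        | none => if ∃ i ∈ l, p i then some 1 else none := by
  induction l with
  | nil => intro acc; cases acc <;> simp
  | cons x xs ih =>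
    intro acc
    cases acc with
    | some r => rw [List.foldl_cons, ih]
    | none =>
      rw [List.foldl_cons]
      by_cases hx : p x
      · rw [if_pos hx, ih]
        simp [hx]
      · rw [if_neg hx, ih]
        simp [hx]

-- membership in the search ranges, as Nat offsets
theorem pvMem_range_iff (K : Nat) (i : Int) :
    i ∈ PySem.List.pyRange 0 (K : Int) 1 ↔ ∃ I : Nat, i = (I : Int) ∧ I < K := by
  rw [PySem.List.mem_pyRange_one]
  constructor
  · rintro ⟨h0, hK⟩
    exact ⟨i.toNat, by omega, by omega⟩
  · rintro ⟨I, rfl, hI⟩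
    omega

theorem pvWindowEmpty_iff (backpack : List String) (A B I J : Nat) :
    pvWindowEmpty backpack (A : Int) (B : Int) (I : Int) (J : Int) = true
      ↔ ∀ x < A, ∀ y < B, pvV backpack (I+x) (J+y) = 0 := by
  unfold pvWindowEmpty
  rw [List.all_eq_true]
  constructor
  · intro h x hx y hy
    have hxm : ((x : Int)) ∈ PySem.List.pyRange 0 (A : Int) 1 := by
      rw [PySem.List.mem_pyRange_one]; omega
    have h2 := h _ hxm
    rw [List.all_eq_true] at h2
    have hym : ((y : Int)) ∈ PySem.List.pyRange 0 (B : Int) 1 := by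
      rw [PySem.List.mem_pyRange_one]; omega
    have h3 := h2 _ hym
    simp only [Bool.not_eq_eq_eq_not, Bool.not_true, beq_eq_false_iff_ne, ne_eq] at h3
    unfold pvV
    rw [if_neg (by push_cast; exact h3)]
  · intro h xi hxi
    obtain ⟨x, rfl, hx⟩ := (pvMem_range_iff A xi).mp hxi
    rw [List.all_eq_true]
    intro yi hyi
    obtain ⟨y, rfl, hy⟩ := (pvMem_range_iff B yi).mp hyi
    have h2 := h x hx y hy
    unfold pvV at h2
    by_cases hc : pvCell backpack ((I+x : Nat) : Int) ((J+y : Nat) : Int) = some '1'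
    · rw [if_pos hc] at h2; norm_num at h2
    · simp only [Bool.not_eq_eq_eq_not, Bool.not_true, beq_eq_false_iff_ne, ne_eq]
      push_cast at hc ⊢
      exact hc

-- the nested early-return double loop, as a single existential test
theorem pvFoldFlag2 (l1 l2 : List Int) (q : Int → Int → Prop) [∀ i j, Decidable (q i j)] :
    l1.foldl (fun acc i => l2.foldl (fun a j => match a with
      | some r => some r
      | none => if q i j then some (1:Int) else none) acc) none
    = if ∃ i ∈ l1, ∃ j ∈ l2, q i j then some 1 else none := by
  have h1 : (fun (acc : Option Int) (i : Int) => l2.foldl (fun a j => match a with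
        | some r => some r
        | none => if q i j then some (1:Int) else none) acc)
      = (fun (acc : Option Int) (i : Int) => match acc with
        | some r => some r
        | none => if ∃ j ∈ l2, q i j then some (1:Int) else none) :=
    funext fun acc => funext fun i => pvFoldFlag l2 (q i) acc
  rw [h1, pvFoldFlag l1 (fun i => ∃ j ∈ l2, q i j) none]

-- B's test holds somewhere iff A's prefix-sum window test holds somewhere
theorem pvCond_iff (backpack : List String) (M N A B : Nat) :
    ((PySem.List.pyRange 0 ((M:Int)-(A:Int)+1) 1).any fun i =>
      (PySem.List.pyRange 0 ((N:Int)-(B:Int)+1) 1).any fun j =>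
        pvWindowEmpty backpack (A:Int) (B:Int) i j) = true
    ↔ ∃ i ∈ PySem.List.pyRange 0 ((M:Int)-(A:Int)+1) 1,
        ∃ j ∈ PySem.List.pyRange 0 ((N:Int)-(B:Int)+1) 1,
          pvGet2 (pvBuild (M:Int) (N:Int) backpack) (i+(A:Int)) (j+(B:Int))
            - pvGet2 (pvBuild (M:Int) (N:Int) backpack) i (j+(B:Int))
            - pvGet2 (pvBuild (M:Int) (N:Int) backpack) (i+(A:Int)) j
            + pvGet2 (pvBuild (M:Int) (N:Int) backpack) i j = 0 := by
  rw [List.any_eq_true]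
  constructor
  · rintro ⟨i, hi, hany⟩
    obtain ⟨I, rfl, hIlt⟩ : ∃ I : Nat, i = (I : Int) ∧ (I : Int) < (M:Int)-(A:Int)+1 := by
      rw [PySem.List.mem_pyRange_one] at hi
      exact ⟨i.toNat, by omega, by omega⟩
    rw [List.any_eq_true] at hany
    obtain ⟨j, hj, hwe⟩ := hany
    obtain ⟨J, rfl, hJlt⟩ : ∃ J : Nat, j = (J : Int) ∧ (J : Int) < (N:Int)-(B:Int)+1 := by
      rw [PySem.List.mem_pyRange_one] at hj
      exact ⟨j.toNat, by omega, by omega⟩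
    refine ⟨(I : Int), hi, (J : Int), hj, ?_⟩
    have cIA : ((I:Int) + (A:Int)) = ((I+A : Nat) : Int) := by omega
    have cJB : ((J:Int) + (B:Int)) = ((J+B : Nat) : Int) := by omega
    rw [cIA, cJB, pvBuild_get backpack M N (I+A) (J+B) (by omega) (by omega),
      pvBuild_get backpack M N I (J+B) (by omega) (by omega),
      pvBuild_get backpack M N (I+A) J (by omega) (by omega),
      pvBuild_get backpack M N I J (by omega) (by omega)]
    exact (pvTotal_zero_iff backpack I J A B).mpr ((pvWindowEmpty_iff backpack A B I J).mp hwe)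
  · rintro ⟨i, hi, hcond⟩
    obtain ⟨I, rfl, hIlt⟩ : ∃ I : Nat, i = (I : Int) ∧ (I : Int) < (M:Int)-(A:Int)+1 := by
      rw [PySem.List.mem_pyRange_one] at hi
      exact ⟨i.toNat, by omega, by omega⟩
    refine ⟨(I : Int), hi, ?_⟩
    rw [List.any_eq_true]
    obtain ⟨j, hj, hc⟩ := hcond
    obtain ⟨J, rfl, hJlt⟩ : ∃ J : Nat, j = (J : Int) ∧ (J : Int) < (N:Int)-(B:Int)+1 := by
      rw [PySem.List.mem_pyRange_one] at hj
      exact ⟨j.toNat, by omega, by omega⟩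
    refine ⟨(J : Int), hj, ?_⟩
    have cIA : ((I:Int) + (A:Int)) = ((I+A : Nat) : Int) := by omega
    have cJB : ((J:Int) + (B:Int)) = ((J+B : Nat) : Int) := by omega
    rw [cIA, cJB, pvBuild_get backpack M N (I+A) (J+B) (by omega) (by omega),
      pvBuild_get backpack M N I (J+B) (by omega) (by omega),
      pvBuild_get backpack M N (I+A) J (by omega) (by omega),
      pvBuild_get backpack M N I J (by omega) (by omega)] at hc
    exact (pvWindowEmpty_iff backpack A B I J).mpr ((pvTotal_zero_iff backpack I J A B).mp hc)

-- ===== VERDICT (by name: the statement is the Claim_ definition above) =====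
theorem can_place_item_prefix_sum_spec : Claim_equal_can_place_item_prefix_sum := by
  intro m n a b backpack _ hpre
  obtain ⟨_, hcase⟩ := hpre
  unfold Spec_can_place_item_prefix_sum
  unfold can_place_item_prefix_sum can_place_item_prefix_sum_alt
  simp only []
  rw [pvFoldFlag2]
  split_ifs with hP hB hB
  · rfl
  · rcases hcase with ⟨hm, hn, ha, hb⟩ | hdeg
    · obtain ⟨M, rfl⟩ : ∃ M : Nat, m = (M : Int) := ⟨m.toNat, by omega⟩
      obtain ⟨N, rfl⟩ : ∃ N : Nat, n = (N : Int) := ⟨n.toNat, by omega⟩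
      obtain ⟨A, rfl⟩ : ∃ A : Nat, a = (A : Int) := ⟨a.toNat, by omega⟩
      obtain ⟨B, rfl⟩ : ∃ B : Nat, b = (B : Int) := ⟨b.toNat, by omega⟩
      exact absurd ((pvCond_iff backpack M N A B).mpr hP) hB
    · obtain ⟨i, hi, j, hj, _⟩ := hP
      rw [PySem.List.mem_pyRange_one] at hi hj
      omega
  · rcases hcase with ⟨hm, hn, ha, hb⟩ | hdeg
    · obtain ⟨M, rfl⟩ : ∃ M : Nat, m = (M : Int) := ⟨m.toNat, by omega⟩
      obtain ⟨N, rfl⟩ : ∃ N : Nat, n = (N : Int) := ⟨n.toNat, by omega⟩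
      obtain ⟨A, rfl⟩ : ∃ A : Nat, a = (A : Int) := ⟨a.toNat, by omega⟩
      obtain ⟨B, rfl⟩ : ∃ B : Nat, b = (B : Int) := ⟨b.toNat, by omega⟩
      exact absurd ((pvCond_iff backpack M N A B).mp hB) hP
    · rw [List.any_eq_true] at hB
      obtain ⟨i, hi, hin⟩ := hB
      rw [List.any_eq_true] at hin
      obtain ⟨j, hj, _⟩ := hin
      rw [PySem.List.mem_pyRange_one] at hi hj
      omega
  · rfl
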